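-- pv_equiv track=rewrite | github.com/prathamdesai13/SortsNsuch | RandyDandyProblems.py | triplets
-- ===== SOURCE A (Python) =====
-- from collections import Counter, OrderedDict
--
-- def triplets(a, b, c):
--     """
--     Gievn arrays a, b, c, find all triplets (p, q, r) with
--     p in a, q in b, r in c and p <= q and r <= q.
--     """
--
--     # using multiplication principle of disjoint events (quadratic)
--
--     num_trips = 0
--     a.sort()
--     b.sort()
--     c.sort()
--     qs = OrderedDict()
--     for q in b:
--         if q not in qs:
--             qs[q] = True
--
--     index_a = index_c = 0
--     for q in qs:
--         while index_a < len(a):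
--             if a[index_a] <= q:
--                 index_a += 1
--             else:
--                 break
--         while index_c < len(c):
--             if c[index_c] <= q:
--                 index_c += 1
--             else:
--                 break
--         num_trips += index_a * index_c
--     return num_trips
-- ===== SOURCE B (Python) =====
-- def _le_count(xs, q):
--     """Number of elements <= q in sorted xs: first index with xs[i] > q, by binary search."""
--     lo, hi = 0, len(xs)
--     while lo < hi:
--         mid = (lo + hi) // 2
--         if xs[mid] <= q:
--             lo = mid + 1
--         else:
--             hi = mid
--     return lo
--
--
-- def triplets(a, b, c):
--     """
--     Given arrays a, b, c, count triplets (p, q, r) with p in a, q in b,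
--     r in c, p <= q and r <= q.  Sorts a, b, c in place, exactly as A does.
--     Single pass over sorted b skipping adjacent duplicates; each factor is
--     found by binary search instead of A's OrderedDict dedup and
--     cross-iteration two-pointer state.
--     """
--     a.sort()
--     b.sort()
--     c.sort()
--     total = 0
--     prev = None
--     for q in b:
--         if prev is None or q != prev:
--             total += _le_count(a, q) * _le_count(c, q)
--         prev = q
--     return total
-- ===== Notes on version B (the rewrite author's own statement) =====
-- stated objective: alternative
-- what changed: A's OrderedDict dedup plus an amortized two-pointer sweep carrying index_a/index_c across q's is replaced by one pass over sorted b that skips adjacent duplicates and, for each new q, multiplies two counts found by hand-written binary search; return-value equivalence (both sort the arguments in place).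
import Mathlib
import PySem

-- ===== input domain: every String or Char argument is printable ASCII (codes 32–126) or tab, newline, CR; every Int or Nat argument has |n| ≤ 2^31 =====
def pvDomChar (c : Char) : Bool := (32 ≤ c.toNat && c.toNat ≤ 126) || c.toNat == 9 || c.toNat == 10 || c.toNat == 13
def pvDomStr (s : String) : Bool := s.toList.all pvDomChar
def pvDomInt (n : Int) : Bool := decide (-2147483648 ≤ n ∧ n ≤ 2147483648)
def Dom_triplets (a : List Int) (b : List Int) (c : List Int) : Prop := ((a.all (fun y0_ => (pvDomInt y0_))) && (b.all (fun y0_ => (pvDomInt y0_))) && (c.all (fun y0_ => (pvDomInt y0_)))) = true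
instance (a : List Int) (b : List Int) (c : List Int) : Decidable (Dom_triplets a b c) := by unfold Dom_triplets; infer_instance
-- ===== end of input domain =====

-- B changes A's OrderedDict dedup + cross-iteration two-pointer sweep into one pass over
-- sorted b skipping adjacent duplicates with stateless direct counts (objective: simpler);
-- equivalence is about the RETURN value (both A and B sort a, b, c in place identically).

-- ===== PORT A =====
-- A's inner 'while index < len(xs): if xs[index] <= q: index += 1 else: break'
def pvAdvance (xs : List Int) (q : Int) (i : Nat) : Nat :=
  if h : i < xs.length then
    if xs[i] ≤ q then pvAdvance xs q (i + 1) else i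
  else i
termination_by xs.length - i

def triplets (a : List Int) (b : List Int) (c : List Int) : Int :=
  let a' := PySem.List.sorted a (fun x => x)
  let b' := PySem.List.sorted b (fun x => x)
  let c' := PySem.List.sorted c (fun x => x)
  -- qs = OrderedDict(); for q in b: if q not in qs: qs[q] = True
  let qs : PySem.Dict Int Bool :=
    b'.foldl (fun d q => if d.contains q then d else d.insert q true) PySem.Dict.empty
  -- for q in qs: advance index_a, advance index_c, num_trips += index_a * index_c
  let st := qs.keys.foldl
    (fun (st : Nat × Nat × Int) q =>
      let ia := pvAdvance a' q st.1
      let ic := pvAdvance c' q st.2.1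
      (ia, ic, st.2.2 + (ia : Int) * (ic : Int)))
    (0, 0, 0)
  st.2.2

-- ===== PORT B =====
-- Source B's _le_count: binary search for the first index with xs[i] > q.
-- The while loop is run on a fuel of len(xs) steps (hi - lo shrinks every step and starts
-- at len(xs), so the fuel is never exhausted); the getD default is never read, since every
-- xs[mid] access Python makes has lo <= mid < hi <= len(xs).
def pvLeCountAux (xs : List Int) (q : Int) : Nat → Nat → Nat → Nat
  | 0, lo, _ => lo
  | fuel + 1, lo, hi =>
    if lo < hi then
      let mid := (lo + hi) / 2
      if xs.getD mid 0 ≤ q then pvLeCountAux xs q fuel (mid + 1) hi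
      else pvLeCountAux xs q fuel lo mid
    else lo

def pvLeCount (xs : List Int) (q : Int) : Nat :=
  pvLeCountAux xs q xs.length 0 xs.length

def triplets_alt (a : List Int) (b : List Int) (c : List Int) : Int :=
  let a' := PySem.List.sorted a (fun x => x)
  let b' := PySem.List.sorted b (fun x => x)
  let c' := PySem.List.sorted c (fun x => x)
  -- total = 0; prev = None; for q in b: if prev is None or q != prev: total += …; prev = q
  let st := b'.foldl
    (fun (st : Int × Option Int) q =>
      if st.2 = none ∨ st.2 ≠ some q then
        (st.1 + ((pvLeCount a' q : Int))
              * ((pvLeCount c' q : Int)), some q)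
      else (st.1, some q))
    (0, none)
  st.1

-- ===== PRECONDITION & SPEC =====
def Spec_triplets (a : List Int) (b : List Int) (c : List Int) (out : Int) : Prop := out = triplets_alt a b c
instance (a : List Int) (b : List Int) (c : List Int) (out : Int) : Decidable (Spec_triplets a b c out) := by unfold Spec_triplets; infer_instance

-- ===== CLAIM (what is proved, stated in full; the proofs are below) =====
def Claim_equal_triplets : Prop := ∀ (a : List Int) (b : List Int) (c : List Int), Dom_triplets a b c → Spec_triplets a b c (triplets a b c)

-- ===== LEMMAS AND PROOFS =====

-- number of elements ≤ q in a prefix-closed (sorted) sense: length of the ≤q-takeWhile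
def tcnt (xs : List Int) (q : Int) : Nat := (xs.takeWhile (fun x => decide (x ≤ q))).length

lemma tcnt_le_length (xs : List Int) (q : Int) : tcnt xs q ≤ xs.length :=
  (List.takeWhile_sublist _).length_le

lemma tcnt_cons_pos {x q : Int} (r : List Int) (hx : x ≤ q) :
    tcnt (x :: r) q = tcnt r q + 1 := by simp [tcnt, hx]

lemma tcnt_cons_neg {x q : Int} (r : List Int) (hx : ¬ x ≤ q) :
    tcnt (x :: r) q = 0 := by simp [tcnt, hx]

lemma tcnt_lt_le (xs : List Int) (q : Int) :
    ∀ j (h : j < xs.length), j < tcnt xs q → xs[j] ≤ q := by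
  induction xs with
  | nil => intro j h; simp at h
  | cons x r ih =>
    intro j h hj
    by_cases hx : x ≤ q
    · cases j with
      | zero => simpa using hx
      | succ k =>
        rw [tcnt_cons_pos r hx] at hj
        exact ih k (by simpa using h) (by omega)
    · rw [tcnt_cons_neg r hx] at hj; omega
lemma tcnt_get_gt (xs : List Int) (q : Int) (h : tcnt xs q < xs.length) :
    ¬ xs[tcnt xs q] ≤ q := by
  induction xs with
  | nil => simp at h
  | cons x r ih =>
    by_cases hx : x ≤ q
    · have ht : tcnt (x :: r) q = tcnt r q + 1 := tcnt_cons_pos r hx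
      simp only [ht] at h ⊢
      simpa using ih (by simpa using h)
    · have ht : tcnt (x :: r) q = 0 := tcnt_cons_neg r hx
      simp only [ht]; simpa using hx

lemma pvAdvance_eq (xs : List Int) (q : Int) :
    ∀ i, i ≤ tcnt xs q → pvAdvance xs q i = tcnt xs q := by
  intro i
  induction i using pvAdvance.induct xs q with
  | case1 i h hle ih =>
    intro hi
    rcases lt_or_eq_of_le hi with hlt | heq
    · rw [pvAdvance]; simp [h, hle]; exact ih (by omega)
    · exact absurd hle (heq ▸ tcnt_get_gt xs q (heq ▸ h))
  | case2 i h hgt =>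
    intro hi
    rcases lt_or_eq_of_le hi with hlt | heq
    · exact absurd (tcnt_lt_le xs q i h hlt) hgt
    · rw [pvAdvance, dif_pos h, if_neg hgt]; exact heq
  | case3 i h =>
    intro hi
    have := tcnt_le_length xs q
    have h2 : i = tcnt xs q := by omega
    rw [pvAdvance, dif_neg h]; exact h2

lemma tcnt_mono (xs : List Int) {q q' : Int} (h : q ≤ q') : tcnt xs q ≤ tcnt xs q' := by
  induction xs with
  | nil => simp [tcnt]
  | cons x r ih =>
    by_cases hx : x ≤ q
    · have hx' : x ≤ q' := le_trans hx h
      simp [tcnt, hx, hx'] at ih ⊢; omega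
    · simp [tcnt, hx]

lemma pvLeCountAux_eq (xs : List Int) (q : Int) (hs : xs.Pairwise (· ≤ ·)) :
    ∀ (fuel lo hi : Nat), hi ≤ xs.length → lo ≤ tcnt xs q → tcnt xs q ≤ hi →
    hi - lo ≤ fuel → pvLeCountAux xs q fuel lo hi = tcnt xs q := by
  have hmono : ∀ i j (hi : i < xs.length) (hj : j < xs.length), i < j → xs[i] ≤ xs[j] := by
    intro i j hi hj hij
    exact (List.pairwise_iff_getElem.1 hs) i j hi hj hij
  intro fuel
  induction fuel with
  | zero => intro lo hi _ h1 h2 hf; simp [pvLeCountAux]; omega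
  | succ fuel ih =>
    intro lo hi hhi h1 h2 hf
    by_cases h : lo < hi
    · rw [pvLeCountAux, if_pos h]
      have hm : (lo + hi) / 2 < xs.length := by omega
      show (if xs.getD ((lo + hi) / 2) 0 ≤ q then pvLeCountAux xs q fuel ((lo + hi) / 2 + 1) hi
        else pvLeCountAux xs q fuel lo ((lo + hi) / 2)) = tcnt xs q
      rw [List.getD_eq_getElem xs 0 hm]
      by_cases hle : xs[(lo + hi) / 2] ≤ q
      · rw [if_pos hle]
        apply ih _ _ hhi _ h2 (by omega)
        -- xs[mid] ≤ q forces mid < tcnt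
        by_contra hc
        have hmid : tcnt xs q ≤ (lo + hi) / 2 := by omega
        have htl : tcnt xs q < xs.length := by omega
        have hxt : xs[tcnt xs q]'htl ≤ q := by
          rcases lt_or_eq_of_le hmid with hlt | heq
          · exact le_trans (hmono _ _ htl (by omega) hlt) hle
          · simpa only [heq] using hle
        exact (tcnt_get_gt xs q htl) hxt
      · rw [if_neg hle]
        apply ih _ _ (by omega) h1 _ (by omega)
        -- ¬ xs[mid] ≤ q forces tcnt ≤ mid
        by_contra hc
        exact hle (tcnt_lt_le xs q _ (by omega) (by omega))
    · rw [pvLeCountAux, if_neg h]; omega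

-- adjacent dedup relative to a previous value (B's 'prev' skipping; also = ofList on sorted input)
def dd (p : Int) : List Int → List Int
  | [] => []
  | q :: r => if q = p then dd p r else q :: dd q r

def ddTop : List Int → List Int
  | [] => []
  | x :: r => x :: dd x r

lemma dd_sublist (l : List Int) : ∀ p, List.Sublist (dd p l) l := by
  induction l with
  | nil => intro p; simp [dd]
  | cons q r ih =>
    intro p
    by_cases h : q = p
    · simpa [dd, h] using (ih p).cons q
    · simpa [dd, h] using (ih q).cons₂ q

lemma ddTop_sublist (l : List Int) : List.Sublist (ddTop l) l := by
  cases l with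
  | nil => simp [ddTop]
  | cons x r => exact (dd_sublist r x).cons₂ x

lemma discard_ofList_eq_dd (r : List Int) : ∀ x, (x :: r).Pairwise (· ≤ ·) →
    PySem.Set.discard (PySem.Set.ofList r) x = dd x r := by
  induction r with
  | nil => intro x _; simp [PySem.Set.discard, dd]
  | cons y r' ih =>
    intro x h
    rcases List.pairwise_cons.1 h with ⟨hx, hyr⟩
    rcases List.pairwise_cons.1 hyr with ⟨hy, hr'⟩
    rw [PySem.Set.ofList_cons]
    by_cases hxy : y = x
    · subst hxy
      have hpw : (y :: r').Pairwise (· ≤ ·) := hyr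
      simp only [dd]
      rw [← ih y hpw]
      simp [PySem.Set.discard, List.filter_filter]
    · have hxy' : x < y := lt_of_le_of_ne (hx y (by simp)) (fun h' => hxy h'.symm)
      have hnx : x ∉ PySem.Set.ofList r' := by
        intro hmem
        have : x ∈ r' := (PySem.Set.mem_ofList _ _).1 hmem
        exact absurd (hy x this) (not_le.2 hxy')
      have hnx2 : x ∉ PySem.Set.discard (PySem.Set.ofList r') y := by
        intro hmem
        exact hnx ((PySem.Set.mem_discard _ _ _).1 hmem).1
      have step : PySem.Set.discard (y :: PySem.Set.discard (PySem.Set.ofList r') y) x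
          = y :: PySem.Set.discard (PySem.Set.discard (PySem.Set.ofList r') y) x := by
        simp [PySem.Set.discard, hxy]
      rw [step]
      have : PySem.Set.discard (PySem.Set.discard (PySem.Set.ofList r') y) x
          = PySem.Set.discard (PySem.Set.ofList r') y := by
        apply List.filter_eq_self.2
        intro a ha
        have : a ≠ x := fun h' => hnx2 (h' ▸ ha)
        simpa using this
      rw [this, ih y hyr]
      simp [dd, hxy]

lemma ofList_eq_ddTop (l : List Int) (h : l.Pairwise (· ≤ ·)) :
    PySem.Set.ofList l = ddTop l := by
  cases l with
  | nil => simp [ddTop, PySem.Set.ofList]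
  | cons x r =>
    rw [PySem.Set.ofList_cons, discard_ofList_eq_dd r x h]
    rfl

-- A's dict-building loop: the keys are the first-occurrence dedup of the list
lemma keys_condInsert_fold (l : List Int) :
    ∀ (d : PySem.Dict Int Bool),
    (l.foldl (fun d q => if d.contains q then d else d.insert q true) d).keys
      = PySem.Set.update d.keys l := by
  induction l with
  | nil => intro d; simp [PySem.Set.update]
  | cons q r ih =>
    intro d
    rw [List.foldl_cons, PySem.Set.update_cons]
    by_cases h : d.contains q
    · have hmem : q ∈ d.keys := (PySem.Dict.contains_iff_mem_keys _ _).1 h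
      rw [if_pos h, ih d, PySem.Set.add_of_mem hmem]
    · have hnmem : q ∉ d.keys := fun hm => h ((PySem.Dict.contains_iff_mem_keys _ _).2 hm)
      rw [if_neg h, ih, PySem.Dict.keys_insert_of_not_contains (h := by simpa using h),
        PySem.Set.add_of_not_mem hnmem]

-- A's main loop: with increasing q's and pointer state below the next counts,
-- each step lands the pointers exactly on the counts
lemma foldA (a' c' : List Int) (K : List Int) :
    ∀ (i j : Nat) (acc : Int), K.Pairwise (· ≤ ·) →
    (∀ q ∈ K, i ≤ tcnt a' q) → (∀ q ∈ K, j ≤ tcnt c' q) →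
    (K.foldl (fun (st : Nat × Nat × Int) q =>
        let ia := pvAdvance a' q st.1
        let ic := pvAdvance c' q st.2.1
        (ia, ic, st.2.2 + (ia : Int) * (ic : Int))) (i, j, acc)).2.2
      = acc + (K.map (fun q => ((tcnt a' q : Int)) * ((tcnt c' q : Int)))).sum := by
  induction K with
  | nil => intro i j acc _ _ _; simp
  | cons q K' ih =>
    intro i j acc hpw hi hj
    rcases List.pairwise_cons.1 hpw with ⟨hq, hK'⟩
    have hia : pvAdvance a' q i = tcnt a' q := pvAdvance_eq a' q i (hi q (by simp))
    have hic : pvAdvance c' q j = tcnt c' q := pvAdvance_eq c' q j (hj q (by simp))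
    rw [List.foldl_cons]
    simp only [hia, hic]
    rw [ih (tcnt a' q) (tcnt c' q) (acc + (tcnt a' q : Int) * (tcnt c' q : Int)) hK'
      (fun q' hq' => tcnt_mono a' (hq q' hq')) (fun q' hq' => tcnt_mono c' (hq q' hq'))]
    simp [List.sum_cons]
    ring

-- B's main loop after the first element: skipping q = prev sums over the adjacent dedup
lemma foldB (a' c' : List Int) (l : List Int) :
    ∀ (p : Int) (acc : Int),
    (l.foldl (fun (st : Int × Option Int) q =>
        if st.2 = none ∨ st.2 ≠ some q then
          (st.1 + ((pvLeCount a' q : Int))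
                * ((pvLeCount c' q : Int)), some q)
        else (st.1, some q)) (acc, some p)).1
      = acc + ((dd p l).map (fun q => ((pvLeCount a' q : Int))
                * ((pvLeCount c' q : Int)))).sum := by
  induction l with
  | nil => intro p acc; simp [dd]
  | cons q r ih =>
    intro p acc
    rw [List.foldl_cons]
    by_cases h : q = p
    · subst h
      simp only [dd]
      rw [if_neg (by simp)]
      exact ih q acc
    · have hc : ((some p = (none : Option Int)) ∨ (some p ≠ some q)) := by simp [h, eq_comm]
      rw [if_pos hc, ih q]
      simp [dd, fun h' : q = p => h h', List.sum_cons]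
      ring

-- ===== VERDICT (by name: the statement is the Claim_ definition above) =====
theorem triplets_spec : Claim_equal_triplets := by
  intro a b c _
  unfold Spec_triplets triplets triplets_alt
  simp only []
  set a' := PySem.List.sorted a (fun x => x) with ha'
  set b' := PySem.List.sorted b (fun x => x) with hb'
  set c' := PySem.List.sorted c (fun x => x) with hc'
  have hpa : a'.Pairwise (· ≤ ·) := by
    simpa using PySem.List.sorted_pairwise (xs := a) (key := fun x => x)
  have hpb : b'.Pairwise (· ≤ ·) := by
    simpa using PySem.List.sorted_pairwise (xs := b) (key := fun x => x)
  have hpc : c'.Pairwise (· ≤ ·) := by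
    simpa using PySem.List.sorted_pairwise (xs := c) (key := fun x => x)
  -- A's dict keys are the dedup of b', which on a sorted list is ddTop b'
  have hkeys : (b'.foldl (fun d q => if d.contains q then d else d.insert q true)
      (PySem.Dict.empty : PySem.Dict Int Bool)).keys = ddTop b' := by
    rw [keys_condInsert_fold b' PySem.Dict.empty]
    have : (PySem.Dict.empty : PySem.Dict Int Bool).keys = [] := by rfl
    rw [this]
    rw [PySem.Set.update_nil_left]
    exact ofList_eq_ddTop b' hpb
  rw [hkeys]
  -- rewrite B's binary-search counts as tcnt
  have hcnt : ∀ (xs : List Int), xs.Pairwise (· ≤ ·) → ∀ q,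
      ((pvLeCount xs q : Int)) = (tcnt xs q : Int) := by
    intro xs hxs q
    have := pvLeCountAux_eq xs q hxs xs.length 0 xs.length le_rfl (Nat.zero_le _)
      (tcnt_le_length xs q) (by omega)
    unfold pvLeCount
    exact_mod_cast this
  cases hb : b' with
  | nil => simp [ddTop]
  | cons x r =>
    have hpw : (x :: r).Pairwise (· ≤ ·) := hb ▸ hpb
    have hdd : ddTop (x :: r) = x :: dd x r := rfl
    rw [hdd]
    rw [foldA a' c' (x :: dd x r) 0 0 0
      (hdd ▸ (hpw.sublist (ddTop_sublist (x :: r))))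
      (fun q _ => Nat.zero_le _) (fun q _ => Nat.zero_le _)]
    rw [List.foldl_cons]
    have hc0 : (((none : Option Int) = none) ∨ ((none : Option Int) ≠ some x)) := Or.inl rfl
    rw [if_pos hc0]
    rw [foldB a' c' r x]
    simp only [List.map_cons, List.sum_cons]
    rw [hcnt a' hpa x, hcnt c' hpc x]
    have : ∀ L : List Int, (L.map (fun q => ((pvLeCount a' q : Int))
                * ((pvLeCount c' q : Int)))).sum
        = (L.map (fun q => ((tcnt a' q : Int)) * ((tcnt c' q : Int)))).sum := by
      intro L
      congr 1
      apply List.map_congr_left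
      intro q _
      rw [hcnt a' hpa q, hcnt c' hpc q]
    rw [this]
    ring
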